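-- pv_equiv track=rewrite | github.com/mitsuo0114/competitive_programming | python/atcoder/Beginner072/D.py | solve
-- ===== SOURCE A (Python) =====
-- def solve(N, Ps):
--     ans = 0
--     for i in range(1, N):
--         if Ps[i - 1] == i and Ps[i] == i + 1:
--             Ps[i - 1] = i + 1
--             Ps[i] = i
--             ans += 1
--     ans += sum(1 for i in range(N) if Ps[i] == i + 1)
--     return ans
-- ===== SOURCE B (Python) =====
-- def solve(N, Ps):
--     # Single merged forward pass: swap-and-count in one while loop instead of
--     # a swapping pass followed by a full fixed-point rescan.
--     ans = 0
--     i = 0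
--     while i < N:
--         if i + 1 < N and Ps[i] == i + 1 and Ps[i + 1] == i + 2:
--             Ps[i], Ps[i + 1] = i + 2, i + 1
--             ans += 1
--             i += 2
--         elif Ps[i] == i + 1:
--             ans += 1
--             i += 1
--         else:
--             i += 1
--     return ans
-- ===== Notes on version B (the rewrite author's own statement) =====
-- stated objective: alternative
-- what changed: A's two passes (a swapping sweep over range(1,N), then a full rescan summing the remaining fixed points) are merged into one forward while-loop that swaps, counts and advances by 1 or 2 in a single pass.
import Mathlib
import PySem

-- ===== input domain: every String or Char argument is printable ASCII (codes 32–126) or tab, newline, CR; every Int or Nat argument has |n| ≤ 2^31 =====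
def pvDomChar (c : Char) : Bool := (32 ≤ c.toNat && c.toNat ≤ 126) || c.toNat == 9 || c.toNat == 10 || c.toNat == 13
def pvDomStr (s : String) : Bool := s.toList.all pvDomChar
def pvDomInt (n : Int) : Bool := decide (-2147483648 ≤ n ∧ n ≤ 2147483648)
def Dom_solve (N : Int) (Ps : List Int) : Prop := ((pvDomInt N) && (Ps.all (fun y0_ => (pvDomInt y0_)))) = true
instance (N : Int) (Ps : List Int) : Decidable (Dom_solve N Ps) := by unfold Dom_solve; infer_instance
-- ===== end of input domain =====

-- B merges A's swapping pass and its subsequent full fixed-point rescan into ONE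
-- forward while-loop that swaps and counts simultaneously (alternative decomposition).
-- Both Pythons mutate Ps in place identically; the equivalence proved is about the return value.

-- ===== PORT A =====
-- for i in range(1, N): if Ps[i-1]==i and Ps[i]==i+1: Ps[i-1],Ps[i]=i+1,i; ans+=1
-- (loop variable shifted by one, k = i-1, so all indices are Nat; fuel = length of range(1,N);
--  getD's default 0 is never reached under Pre_solve)
def aloopA : List Int → Nat → Nat → List Int × Int
  | ps, _, 0 => (ps, 0)
  | ps, k, f+1 =>
    if ps.getD k 0 = (k : Int) + 1 ∧ ps.getD (k+1) 0 = (k : Int) + 2 then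
      let r := aloopA ((ps.set k ((k : Int) + 2)).set (k+1) ((k : Int) + 1)) (k+1) f
      (r.1, r.2 + 1)
    else aloopA ps (k+1) f

-- sum(1 for i in range(N) if Ps[i] == i + 1)
def countA : List Int → Nat → Nat → Int
  | _, _, 0 => 0
  | ps, i, f+1 => (if ps.getD i 0 = (i : Int) + 1 then 1 else 0) + countA ps (i+1) f

def solve (N : Int) (Ps : List Int) : Int :=
  let n := N.toNat
  let r := aloopA Ps 0 (n - 1)
  r.2 + countA r.1 0 n

-- ===== PORT B =====
-- while i < N: merged swap-or-count step; i advances by 2 after a swap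
def bloopB (ps : List Int) (i n : Nat) : Int :=
  if i < n then
    if i + 1 < n ∧ ps.getD i 0 = (i : Int) + 1 ∧ ps.getD (i+1) 0 = (i : Int) + 2 then
      1 + bloopB ((ps.set i ((i : Int) + 2)).set (i+1) ((i : Int) + 1)) (i+2) n
    else if ps.getD i 0 = (i : Int) + 1 then
      1 + bloopB ps (i+1) n
    else bloopB ps (i+1) n
  else 0
termination_by n - i
decreasing_by all_goals omega

def solve_alt (N : Int) (Ps : List Int) : Int := bloopB Ps 0 N.toNat

-- ===== PRECONDITION & SPEC =====
-- Pre_ excludes exactly the inputs where Python A raises IndexError (N > len(Ps)).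
def Pre_solve (N : Int) (Ps : List Int) : Prop := N ≤ (Ps.length : Int)
instance (N : Int) (Ps : List Int) : Decidable (Pre_solve N Ps) := by unfold Pre_solve; infer_instance
def pvWitness_solve : Int × List Int := (3, [1, 2, 3])

def Spec_solve (N : Int) (Ps : List Int) (out : Int) : Prop := out = solve_alt N Ps
instance (N : Int) (Ps : List Int) (out : Int) : Decidable (Spec_solve N Ps out) := by unfold Spec_solve; infer_instance

-- ===== CLAIM (what is proved, stated in full; the proofs are below) =====
def Claim_equal_solve : Prop := ∀ (N : Int) (Ps : List Int), Dom_solve N Ps → Pre_solve N Ps → Spec_solve N Ps (solve N Ps)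

-- ===== LEMMAS AND PROOFS =====

theorem getD_set_ne' (l : List Int) (m k : Nat) (h : m ≠ k) (v : Int) :
    (l.set m v).getD k 0 = l.getD k 0 := by
  simp [List.getD_eq_getElem?_getD, List.getElem?_set_ne h]

theorem getD_set_self' (l : List Int) (m : Nat) (h : m < l.length) (v : Int) :
    (l.set m v).getD m 0 = v := by
  simp [List.getD_eq_getElem?_getD, h]

-- positions strictly left of the loop index are never touched again
theorem aloopA_getD (f : Nat) : ∀ (ps : List Int) (i k : Nat), k < i →
    ((aloopA ps i f).1).getD k 0 = ps.getD k 0 := by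
  induction f with
  | zero => intro ps i k _; rfl
  | succ f ih =>
    intro ps i k hk
    simp only [aloopA]
    split
    · rw [ih _ (i+1) k (by omega), getD_set_ne' _ _ _ (by omega), getD_set_ne' _ _ _ (by omega)]
    · exact ih ps (i+1) k (by omega)

-- main invariant: A's remaining loop plus its rescan from index j equals B's loop from index j
theorem key : ∀ (m : Nat) (ps : List Int) (j n : Nat), n - j = m → j ≤ n → n ≤ ps.length →
    (aloopA ps j (n-1-j)).2 + countA (aloopA ps j (n-1-j)).1 j (n-j) = bloopB ps j n := by
  intro m
  induction m using Nat.strong_induction_on with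
  | _ m IH =>
    intro ps j n hm hjn hlen
    rw [bloopB]
    by_cases hjlt : j < n
    · rw [if_pos hjlt]
      by_cases hswap : j + 1 < n ∧ ps.getD j 0 = (j : Int) + 1 ∧ ps.getD (j+1) 0 = (j : Int) + 2
      · rw [if_pos hswap]
        obtain ⟨hj1, hfix, hnext⟩ := hswap
        have hf : n - 1 - j = (n - 1 - (j+1)) + 1 := by omega
        rw [hf]
        simp only [aloopA, if_pos (And.intro hfix hnext)]
        set ps₁ := (ps.set j ((j : Int) + 2)).set (j+1) ((j : Int) + 1) with hps₁
        have hlen₁ : ps₁.length = ps.length := by simp [hps₁]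
        have hgj : ps₁.getD j 0 = (j : Int) + 2 := by
          rw [getD_set_ne' _ _ _ (by omega), getD_set_self' _ _ (by omega)]
        have hgj1 : ps₁.getD (j+1) 0 = (j : Int) + 1 := by
          rw [getD_set_self' _ _ (by simp; omega)]
        -- A's next iteration (at k = j+1) does nothing: ps₁[j+1] = j+1 ≠ j+2
        have hstep : aloopA ps₁ (j+1) (n - 1 - (j+1)) = aloopA ps₁ (j+2) (n - 1 - (j+2)) := by
          by_cases h2 : j + 2 < n
          · have hf2 : n - 1 - (j+1) = (n - 1 - (j+2)) + 1 := by omega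
            rw [hf2]
            simp only [aloopA]
            rw [if_neg]
            rintro ⟨hc, -⟩
            rw [hgj1] at hc
            push_cast at hc
            omega
          · have e1 : n - 1 - (j+1) = 0 := by omega
            have e2 : n - 1 - (j+2) = 0 := by omega
            rw [e1, e2]
            rfl
        rw [hstep]
        
        have hc2 : n - j = (n - (j+2)) + 1 + 1 := by omega
        rw [hc2]
        simp only [countA]
        have gj : ((aloopA ps₁ (j+2) (n - 1 - (j+2))).1).getD j 0 = (j : Int) + 2 := by
          rw [aloopA_getD _ _ _ _ (by omega), hgj]
        have gj1 : ((aloopA ps₁ (j+2) (n - 1 - (j+2))).1).getD (j+1) 0 = (j : Int) + 1 := by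
          rw [aloopA_getD _ _ _ _ (by omega), hgj1]
        rw [gj, gj1]
        rw [if_neg (by omega), if_neg (by push_cast; omega)]
        have e3 : j + 1 + 1 = j + 2 := by omega
        rw [e3]
        have ihres := IH (n - (j+2)) (by omega) ps₁ (j+2) n rfl (by omega) (by omega)
        omega
      · rw [if_neg hswap]
        by_cases hj1 : j + 1 < n
        · have hA : ¬ (ps.getD j 0 = (j : Int) + 1 ∧ ps.getD (j+1) 0 = (j : Int) + 2) :=
            fun h => hswap ⟨hj1, h⟩
          have hf : n - 1 - j = (n - 1 - (j+1)) + 1 := by omega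
          rw [hf]
          simp only [aloopA, if_neg hA]
          have hc : n - j = (n - (j+1)) + 1 := by omega
          rw [hc]
          simp only [countA]
          have gj : ((aloopA ps (j+1) (n - 1 - (j+1))).1).getD j 0 = ps.getD j 0 :=
            aloopA_getD _ _ _ _ (by omega)
          rw [gj]
          have ihres := IH (n - (j+1)) (by omega) ps (j+1) n rfl (by omega) hlen
          split_ifs with hfix <;> omega
        · -- j + 1 = n : last index; A's loop is over, only the rescan of index j remains
          have e1 : n - 1 - j = 0 := by omega
          have e2 : n - j = 1 := by omega
          rw [e1, e2]
          have h0 : bloopB ps (j+1) n = 0 := by rw [bloopB]; simp [show ¬ (j+1 < n) by omega]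
          rw [h0]
          simp only [aloopA, countA]
          split_ifs <;> simp
    · rw [if_neg hjlt]
      have e1 : n - 1 - j = 0 := by omega
      have e2 : n - j = 0 := by omega
      rw [e1, e2]
      rfl

-- ===== VERDICT (by name: the statement is the Claim_ definition above) =====
theorem solve_spec : Claim_equal_solve := by
  intro N Ps _ hpre
  unfold Spec_solve solve solve_alt
  have hn : N.toNat ≤ Ps.length := by unfold Pre_solve at hpre; omega
  have h := key N.toNat Ps 0 N.toNat (by omega) (by omega) hn
  simpa using h
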